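-- pv_equiv track=rewrite | github.com/lachlanchen/DomainAndIpManager | traffics/extract_youtube_traffic.py | filter_domains
-- ===== SOURCE A (Python) =====
-- YOUTUBE_SUFFIXES = [
--     "googlevideo.com",
--     "ytimg.com",
--     "ggpht.com",
--     "googleusercontent.com",
--     "googleapis.com",
--     "gstatic.com",
--     "youtube.com",
--     "youtu.be",
--     "doubleclick.net",
--     "app-analytics-services.com",
--     "itunes.apple.com",
--     "google.com",
--     "google.cn",
--     "google.com.hk",
--     "google.com.sg",
-- ]
--
-- def filter_domains(domains: set[str]) -> tuple[list[str], list[str]]: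
--     allowed = []
--     suspicious = []
--     for d in sorted(domains):
--         if any(d == s or d.endswith("." + s) for s in YOUTUBE_SUFFIXES):
--             allowed.append(d)
--         else:
--             suspicious.append(d)
--     return allowed, suspicious
-- ===== SOURCE B (Python) =====
-- YOUTUBE_SUFFIXES = [
--     "googlevideo.com",
--     "ytimg.com",
--     "ggpht.com",
--     "googleusercontent.com",
--     "googleapis.com",
--     "gstatic.com",
--     "youtube.com",
--     "youtu.be",
--     "doubleclick.net",
--     "app-analytics-services.com",
--     "itunes.apple.com",
--     "google.com",
--     "google.cn",
--     "google.com.hk",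
--     "google.com.sg",
-- ]
--
-- SUFFIX_SET = frozenset(YOUTUBE_SUFFIXES)
--
--
-- def _candidates(d):
--     # d itself, plus the substring after every '.' in d
--     yield d
--     for i, ch in enumerate(d):
--         if ch == ".":
--             yield d[i + 1:]
--
--
-- def filter_domains(domains):
--     allowed = []
--     suspicious = []
--     for d in sorted(domains):
--         if any(c in SUFFIX_SET for c in _candidates(d)):
--             allowed.append(d)
--         else:
--             suspicious.append(d)
--     return allowed, suspicious
-- ===== Notes on version B (the rewrite author's own statement) =====
-- stated objective: faster
-- what changed: Instead of scanning the fixed 15-suffix list with endswith for every domain, B generates each domain's own dotted suffixes (the domain itself plus the substring after every '.') and tests each against a frozenset of the YouTube suffixes built once, so per-domain work is a few hashed lookups instead of 15 string-suffix comparisons.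
import Mathlib
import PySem

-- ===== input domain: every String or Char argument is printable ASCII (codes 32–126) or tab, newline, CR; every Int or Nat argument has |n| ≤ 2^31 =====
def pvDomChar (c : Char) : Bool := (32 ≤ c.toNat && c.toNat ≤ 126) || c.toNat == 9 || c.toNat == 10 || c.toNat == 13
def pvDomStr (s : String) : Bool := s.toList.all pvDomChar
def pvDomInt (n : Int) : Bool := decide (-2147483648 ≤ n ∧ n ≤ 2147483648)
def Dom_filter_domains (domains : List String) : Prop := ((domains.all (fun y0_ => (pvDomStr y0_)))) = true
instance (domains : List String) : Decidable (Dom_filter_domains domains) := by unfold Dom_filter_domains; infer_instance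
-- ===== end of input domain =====

-- B scans each domain's own dotted suffixes against a set of the 15 YouTube suffixes
-- instead of testing all 15 fixed suffixes with endswith; return value proved equal.

-- ===== PORT A =====
def youtubeSuffixes : List String :=
  ["googlevideo.com", "ytimg.com", "ggpht.com", "googleusercontent.com", "googleapis.com",
   "gstatic.com", "youtube.com", "youtu.be", "doubleclick.net", "app-analytics-services.com",
   "itunes.apple.com", "google.com", "google.cn", "google.com.hk", "google.com.sg"]

def filter_domains (domains : List String) : List String × List String :=
  (PySem.List.sorted domains (fun x => x) false).foldl
    (fun (acc : List String × List String) d =>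
      if youtubeSuffixes.any (fun s => d == s || PySem.Str.endswith d ("." ++ s)) then
        (acc.1 ++ [d], acc.2)
      else
        (acc.1, acc.2 ++ [d]))
    ([], [])

-- ===== PORT B =====
def suffixSet : PySem.Set String := PySem.Set.ofList youtubeSuffixes

-- _candidates(d): d itself plus, for every '.' at position i, the slice d[i+1:]
def pvCandidates (d : String) : List String :=
  d :: (PySem.List.enumerate d.toList).filterMap
        (fun p => if p.2 == '.' then some (String.ofList (d.toList.drop (p.1 + 1).toNat)) else none)

def filter_domains_alt (domains : List String) : List String × List String :=
  (PySem.List.sorted domains (fun x => x) false).foldl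
    (fun (acc : List String × List String) d =>
      if (pvCandidates d).any (fun c => PySem.Set.contains suffixSet c) then
        (acc.1 ++ [d], acc.2)
      else
        (acc.1, acc.2 ++ [d]))
    ([], [])

-- ===== PRECONDITION & SPEC =====
def Spec_filter_domains (domains : List String) (out : List String × List String) : Prop := out = filter_domains_alt domains
instance (domains : List String) (out : List String × List String) : Decidable (Spec_filter_domains domains out) := by unfold Spec_filter_domains; infer_instance

-- ===== CLAIM (what is proved, stated in full; the proofs are below) =====
def Claim_equal_filter_domains : Prop := ∀ (domains : List String), Dom_filter_domains domains → Spec_filter_domains domains (filter_domains domains)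

-- ===== LEMMAS AND PROOFS =====

-- a list has '.'::t as a suffix iff t is what follows some '.' in it
theorem dot_suffix_iff (l t : List Char) :
    ('.' :: t <:+ l) ↔ ∃ k, ∃ _ : k < l.length, l[k] = '.' ∧ t = l.drop (k + 1) := by
  constructor
  · rintro ⟨p, hp⟩
    refine ⟨p.length, ?_, ?_, ?_⟩
    · subst hp; simp
    · subst hp; simp
    · subst hp; simp [List.drop_append]
  · rintro ⟨k, hk, hdot, ht⟩
    refine ⟨l.take k, ?_⟩
    have : l.drop k = l[k] :: l.drop (k + 1) := (List.getElem_cons_drop hk).symm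
    rw [ht, ← hdot, ← this, List.take_append_drop]

theorem mem_candidates_iff (d c : String) :
    c ∈ pvCandidates d ↔ c = d ∨ '.' :: c.toList <:+ d.toList := by
  unfold pvCandidates
  simp only [List.mem_cons, List.mem_filterMap, PySem.List.mem_enumerate_iff]
  constructor
  · rintro (rfl | ⟨⟨i, ch⟩, ⟨k, hk, hp⟩, hc⟩)
    · exact Or.inl rfl
    · right
      obtain ⟨rfl, rfl⟩ := Prod.mk.injEq .. ▸ hp
      simp only [beq_iff_eq] at hc
      split at hc
      · rename_i hdot
        have hc' := Option.some.inj hc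
        rw [dot_suffix_iff]
        refine ⟨k, hk, hdot, ?_⟩
        have hkk : ((0 : Int) + (k : Int) + 1).toNat = k + 1 := by omega
        rw [← hc', hkk]
        simp
      · exact absurd hc (by simp)
  · rintro (rfl | h)
    · exact Or.inl rfl
    · right
      rw [dot_suffix_iff] at h
      obtain ⟨k, hk, hdot, ht⟩ := h
      refine ⟨((k : Int), d.toList[k]), ⟨k, hk, by simp⟩, ?_⟩
      have hkk : ((k : Int) + 1).toNat = k + 1 := by omega
      simp only [hdot, beq_self_eq_true, if_pos, hkk, Option.some.injEq]
      rw [← ht]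
      simp

-- the two per-domain tests agree on every string
theorem pred_eq (d : String) :
    youtubeSuffixes.any (fun s => d == s || PySem.Str.endswith d ("." ++ s)) =
    (pvCandidates d).any (fun c => PySem.Set.contains suffixSet c) := by
  rw [Bool.eq_iff_iff, List.any_eq_true, List.any_eq_true]
  have hcont : ∀ c : String, (PySem.Set.contains suffixSet c = true) ↔ c ∈ youtubeSuffixes := by
    intro c
    rw [PySem.Set.contains_iff]
    exact (PySem.Set.mem_ofList (y := c) (xs := youtubeSuffixes))
  have hend : ∀ s : String, (PySem.Str.endswith d ("." ++ s) = true) ↔ '.' :: s.toList <:+ d.toList := by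
    intro s
    simp [PySem.Chars.endswith_iff]
  constructor
  · rintro ⟨s, hs, h⟩
    rcases Bool.or_eq_true _ _ |>.mp h with h1 | h2
    · have hds : d = s := by simpa using h1
      exact ⟨d, (mem_candidates_iff d d).mpr (Or.inl rfl), (hcont d).mpr (hds ▸ hs)⟩
    · exact ⟨s, (mem_candidates_iff d s).mpr (Or.inr ((hend s).mp h2)), (hcont s).mpr hs⟩
  · rintro ⟨c, hcand, hcon⟩
    have hcY := (hcont c).mp hcon
    rcases (mem_candidates_iff d c).mp hcand with rfl | hsuf
    · exact ⟨c, hcY, by simp⟩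
    · exact ⟨c, hcY, Bool.or_eq_true _ _ |>.mpr (Or.inr ((hend c).mpr hsuf))⟩

theorem filter_domains_eq (domains : List String) :
    filter_domains domains = filter_domains_alt domains := by
  unfold filter_domains filter_domains_alt
  congr 1
  funext acc d
  rw [pred_eq]

-- ===== VERDICT (by name: the statement is the Claim_ definition above) =====
theorem filter_domains_spec : Claim_equal_filter_domains := by
  intro domains _
  unfold Spec_filter_domains
  exact filter_domains_eq domains
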